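-- pv_equiv track=rewrite | github.com/Meijix/DGTIC-Cursos | 22-algoritmos-ordenacion/07-radix-sort/ejemplos.py | counting_sort_estable
-- ===== SOURCE A (Python) =====
-- def counting_sort_estable(arreglo, clave_idx, rango, offset=0):
--     """Counting sort estable para tuplas, ordena por clave en clave_idx."""
--     n = len(arreglo)
--     conteo = [0] * rango
--     resultado = [None] * n
--
--     for elem in arreglo:
--         conteo[elem[clave_idx] - offset] += 1
--
--     for i in range(1, rango):
--         conteo[i] += conteo[i - 1]
--
--     for i in range(n - 1, -1, -1):
--         c = arreglo[i][clave_idx] - offset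
--         conteo[c] -= 1
--         resultado[conteo[c]] = arreglo[i]
--
--     return resultado
-- ===== SOURCE B (Python) =====
-- def counting_sort_estable(arreglo, clave_idx, rango, offset=0):
--     """Counting sort estable para tuplas, ordena por clave en clave_idx."""
--     buckets = [[] for _ in range(rango)]
--     for elem in arreglo:
--         buckets[elem[clave_idx] - offset].append(elem)
--     resultado = []
--     for b in buckets:
--         resultado.extend(b)
--     return resultado
-- ===== Notes on version B (the rewrite author's own statement) =====
-- stated objective: simpler
-- what changed: Replaces the count/prefix-sum/reverse-placement passes by a list of buckets filled in one forward pass and concatenated in index order, which gives the same stable order without any index arithmetic.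
import Mathlib
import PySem

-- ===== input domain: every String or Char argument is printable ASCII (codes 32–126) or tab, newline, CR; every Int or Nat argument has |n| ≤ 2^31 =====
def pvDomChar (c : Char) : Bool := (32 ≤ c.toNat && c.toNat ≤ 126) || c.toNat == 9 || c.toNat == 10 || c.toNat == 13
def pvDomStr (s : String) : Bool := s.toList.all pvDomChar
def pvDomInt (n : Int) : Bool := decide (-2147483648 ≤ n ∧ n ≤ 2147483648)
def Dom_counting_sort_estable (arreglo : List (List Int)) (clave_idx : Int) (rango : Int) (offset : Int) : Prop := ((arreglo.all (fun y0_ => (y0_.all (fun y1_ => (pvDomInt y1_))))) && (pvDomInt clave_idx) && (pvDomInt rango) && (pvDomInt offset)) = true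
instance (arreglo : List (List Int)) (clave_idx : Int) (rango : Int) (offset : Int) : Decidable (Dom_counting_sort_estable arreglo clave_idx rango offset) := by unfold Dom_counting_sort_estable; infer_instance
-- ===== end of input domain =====

-- B replaces A's count/prefix-sum/reverse-placement passes by buckets filled in one
-- forward pass and concatenated in index order (objective: simpler).

-- ===== PORT A =====
-- literal port of A; resultado's initial `None` placeholders are ported as `[]`
-- (under Pre_ every slot is overwritten before the function returns, so the
-- placeholder value is never visible in the result)
def counting_sort_estable (arreglo : List (List Int)) (clave_idx : Int) (rango : Int) (offset : Int) : List (List Int) :=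
  let n : Int := PySem.List.len arreglo
  let conteo : List Int := List.replicate rango.toNat 0
  let resultado : List (List Int) := List.replicate n.toNat []
  let conteo := arreglo.foldl (fun conteo elem =>
      PySem.List.pySetD conteo (PySem.List.pyGetD elem clave_idx 0 - offset)
        (PySem.List.pyGetD conteo (PySem.List.pyGetD elem clave_idx 0 - offset) 0 + 1)) conteo
  let conteo := (PySem.List.pyRange 1 rango 1).foldl (fun conteo i =>
      PySem.List.pySetD conteo i (PySem.List.pyGetD conteo i 0 + PySem.List.pyGetD conteo (i - 1) 0)) conteo
  let st := (PySem.List.pyRange (n - 1) (-1) (-1)).foldl (fun (st : List Int × List (List Int)) i =>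
      let c := PySem.List.pyGetD (PySem.List.pyGetD arreglo i []) clave_idx 0 - offset
      let conteo' := PySem.List.pySetD st.1 c (PySem.List.pyGetD st.1 c 0 - 1)
      (conteo', PySem.List.pySetD st.2 (PySem.List.pyGetD conteo' c 0) (PySem.List.pyGetD arreglo i []))) (conteo, resultado)
  st.2

-- ===== PORT B =====
def counting_sort_estable_alt (arreglo : List (List Int)) (clave_idx : Int) (rango : Int) (offset : Int) : List (List Int) :=
  let buckets : List (List (List Int)) := (PySem.List.pyRange 0 rango 1).map (fun _ => [])
  let buckets := arreglo.foldl (fun buckets elem =>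
      let c := PySem.List.pyGetD elem clave_idx 0 - offset
      PySem.List.pySetD buckets c (PySem.List.pyGetD buckets c [] ++ [elem])) buckets
  buckets.foldl (fun resultado b => resultado ++ b) []

-- ===== PRECONDITION & SPEC =====
-- Pre_ admits exactly the inputs on which the Python A returns (no IndexError):
-- clave_idx is a valid (possibly negative) Python index into every element, and every
-- key minus offset is a valid (possibly negative) Python index into the count array.
def Pre_counting_sort_estable (arreglo : List (List Int)) (clave_idx : Int) (rango : Int) (offset : Int) : Prop :=
  ∀ e ∈ arreglo, (-(e.length : Int) ≤ clave_idx ∧ clave_idx < e.length) ∧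
    (-rango ≤ PySem.List.pyGetD e clave_idx 0 - offset ∧ PySem.List.pyGetD e clave_idx 0 - offset < rango)
instance (arreglo : List (List Int)) (clave_idx : Int) (rango : Int) (offset : Int) : Decidable (Pre_counting_sort_estable arreglo clave_idx rango offset) := by unfold Pre_counting_sort_estable; infer_instance

def pvWitness_counting_sort_estable : List (List Int) × Int × Int × Int := ([[1, 7], [0, 8], [1, 9]], 0, 2, 0)

def Spec_counting_sort_estable (arreglo : List (List Int)) (clave_idx : Int) (rango : Int) (offset : Int) (out : List (List Int)) : Prop := out = counting_sort_estable_alt arreglo clave_idx rango offset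
instance (arreglo : List (List Int)) (clave_idx : Int) (rango : Int) (offset : Int) (out : List (List Int)) : Decidable (Spec_counting_sort_estable arreglo clave_idx rango offset out) := by unfold Spec_counting_sort_estable; infer_instance

-- ===== CLAIM (what is proved, stated in full; the proofs are below) =====
def Claim_equal_counting_sort_estable : Prop := ∀ (arreglo : List (List Int)) (clave_idx : Int) (rango : Int) (offset : Int), Dom_counting_sort_estable arreglo clave_idx rango offset → Pre_counting_sort_estable arreglo clave_idx rango offset → Spec_counting_sort_estable arreglo clave_idx rango offset (counting_sort_estable arreglo clave_idx rango offset)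

-- ===== LEMMAS AND PROOFS =====

-- the Python index used for both `conteo` and `buckets`: key minus offset
def pvKey (clave_idx offset : Int) (e : List Int) : Int := PySem.List.pyGetD e clave_idx 0 - offset
-- the wrapped (non-negative) index Python's negative indexing resolves `i` to, in a list of length `r.toNat`
def pvWIdx (r i : Int) : Nat := (if i < 0 then i + r else i).toNat
-- the bucket of an element
def pvW (clave_idx rango offset : Int) (e : List Int) : Nat := pvWIdx rango (pvKey clave_idx offset e)
-- per-element precondition
def pvOk (clave_idx rango offset : Int) (e : List Int) : Prop :=
  (-(e.length : Int) ≤ clave_idx ∧ clave_idx < e.length) ∧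
    (-rango ≤ pvKey clave_idx offset e ∧ pvKey clave_idx offset e < rango)

-- Python wrap-around indexing, resolved to `pvWIdx`
theorem pyIdx?_wrap (n : Nat) (i : Int) (h1 : -(n : Int) ≤ i) (h2 : i < n) :
    PySem.List.pyIdx? n i = some (pvWIdx n i) := by
  simp only [PySem.List.pyIdx?, pvWIdx]
  split_ifs <;> simp_all <;> omega

theorem pyGetD_wrap {α : Type} (xs : List α) (i : Int) (d : α)
    (h1 : -(xs.length : Int) ≤ i) (h2 : i < xs.length) :
    PySem.List.pyGetD xs i d = xs.getD (pvWIdx xs.length i) d := by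
  have hw : pvWIdx xs.length i < xs.length := by unfold pvWIdx; split <;> omega
  simp [PySem.List.pyGetD, PySem.List.pyGet?, pyIdx?_wrap xs.length i h1 h2,
    List.getD_eq_getElem?_getD]

theorem pySetD_wrap {α : Type} (xs : List α) (i : Int) (v : α)
    (h1 : -(xs.length : Int) ≤ i) (h2 : i < xs.length) :
    PySem.List.pySetD xs i v = xs.set (pvWIdx xs.length i) v := by
  simp [PySem.List.pySetD, PySem.List.pySet?, pyIdx?_wrap xs.length i h1 h2]

-- reading / writing a `(List.range R).map f` list
theorem map_range_getD {α : Type} (R : Nat) (f : Nat → α) (t : Nat) (ht : t < R) (d : α) :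
    ((List.range R).map f).getD t d = f t := by
  rw [List.getD_eq_getElem?_getD]
  simp [ht]

theorem map_range_set {α : Type} (R : Nat) (f : Nat → α) (t : Nat) (ht : t < R) (v : α) :
    ((List.range R).map f).set t v = (List.range R).map (fun j => if j = t then v else f j) := by
  apply List.ext_getElem <;> simp
  intro j hj
  by_cases h : j = t
  · subst h; simp [List.getElem_set]
  · have h' : ¬ t = j := fun hh => h hh.symm
    simp [List.getElem_set, h, h']


-- reading / writing a map-over-range list at a possibly negative Python index
theorem step_read {α : Type} (rango c : Int) (f : Nat → α) (d : α) (h1 : -rango ≤ c) (h2 : c < rango) :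
    PySem.List.pyGetD ((List.range rango.toNat).map f) c d = f (pvWIdx rango c) := by
  have hr : 0 < rango := by omega
  have hR : ((rango.toNat : Int)) = rango := by omega
  have hlt : pvWIdx rango c < rango.toNat := by unfold pvWIdx; split <;> omega
  rw [pyGetD_wrap _ _ _ (by simp; omega) (by simp; omega)]
  simp only [List.length_map, List.length_range, hR]
  exact map_range_getD _ _ _ hlt _

theorem step_write {α : Type} (rango c : Int) (f : Nat → α) (v : α) (h1 : -rango ≤ c) (h2 : c < rango) :
    PySem.List.pySetD ((List.range rango.toNat).map f) c v
      = (List.range rango.toNat).map (fun j => if j = pvWIdx rango c then v else f j) := by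
  have hr : 0 < rango := by omega
  have hR : ((rango.toNat : Int)) = rango := by omega
  have hlt : pvWIdx rango c < rango.toNat := by unfold pvWIdx; split <;> omega
  rw [pySetD_wrap _ _ _ (by simp; omega) (by simp; omega)]
  simp only [List.length_map, List.length_range, hR]
  exact map_range_set _ _ _ hlt _

-- a valid element's bucket is in range
theorem pvW_lt (clave_idx rango offset : Int) (e : List Int) (h : pvOk clave_idx rango offset e) :
    (pvW clave_idx rango offset e : Int) < rango ∧ pvW clave_idx rango offset e < rango.toNat := by
  obtain ⟨-, hk1, hk2⟩ := h
  unfold pvW pvWIdx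
  split <;> omega

-- ===== A, pass 1: counting =====
theorem count_pass (clave_idx rango offset : Int) :
    ∀ (l p : List (List Int)), (∀ e ∈ l, pvOk clave_idx rango offset e) →
    l.foldl (fun conteo elem =>
        PySem.List.pySetD conteo (PySem.List.pyGetD elem clave_idx 0 - offset)
          (PySem.List.pyGetD conteo (PySem.List.pyGetD elem clave_idx 0 - offset) 0 + 1))
      ((List.range rango.toNat).map (fun j => (p.countP (fun e => pvW clave_idx rango offset e == j) : Int)))
    = (List.range rango.toNat).map (fun j => ((p ++ l).countP (fun e => pvW clave_idx rango offset e == j) : Int)) := by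
  intro l
  induction l with
  | nil => intro p _; simp
  | cons e l ih =>
    intro p hl
    obtain ⟨⟨hi1, hi2⟩, hk1, hk2⟩ := hl e (by simp)
    unfold pvKey at hk1 hk2
    rw [List.foldl_cons, step_read _ _ _ _ hk1 hk2, step_write _ _ _ _ hk1 hk2]
    have hmap : (List.range rango.toNat).map
        (fun j => if j = pvWIdx rango (PySem.List.pyGetD e clave_idx 0 - offset)
          then ((p.countP (fun e' => pvW clave_idx rango offset e' == pvWIdx rango (PySem.List.pyGetD e clave_idx 0 - offset)) : Int) + 1)
          else (p.countP (fun e' => pvW clave_idx rango offset e' == j) : Int))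
        = (List.range rango.toNat).map
          (fun j => (((p ++ [e]).countP (fun e' => pvW clave_idx rango offset e' == j) : Nat) : Int)) := by
      apply List.map_congr_left
      intro j _
      have hpw : pvW clave_idx rango offset e = pvWIdx rango (PySem.List.pyGetD e clave_idx 0 - offset) := rfl
      by_cases h : j = pvWIdx rango (PySem.List.pyGetD e clave_idx 0 - offset) <;>
        simp [h, List.countP_append, List.countP_cons, hpw, pvKey] <;> omega
    rw [hmap, ih (p ++ [e]) (fun x hx => hl x (by simp [hx]))]
    simp

-- ===== A, pass 2: prefix sums =====
-- cumulative count: number of elements with bucket < j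
def pvCum (clave_idx rango offset : Int) (arr : List (List Int)) (j : Nat) : Nat :=
  ((List.range j).map (fun j' => arr.countP (fun e => pvW clave_idx rango offset e == j'))).sum

theorem prefix_pass (clave_idx rango offset : Int) (arr : List (List Int)) (hr : 0 < rango) :
    (PySem.List.pyRange 1 rango 1).foldl (fun conteo i =>
        PySem.List.pySetD conteo i (PySem.List.pyGetD conteo i 0 + PySem.List.pyGetD conteo (i - 1) 0))
      ((List.range rango.toNat).map (fun j => (arr.countP (fun e => pvW clave_idx rango offset e == j) : Int)))
    = (List.range rango.toNat).map (fun j => (pvCum clave_idx rango offset arr (j + 1) : Int)) := by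
  have hR : ((rango.toNat : Int)) = rango := by omega
  have key : ∀ (m : Nat), (m : Int) ≤ rango - 1 →
      ((List.range m).map (fun k : Nat => 1 + (k : Int))).foldl (fun conteo i =>
        PySem.List.pySetD conteo i (PySem.List.pyGetD conteo i 0 + PySem.List.pyGetD conteo (i - 1) 0))
        ((List.range rango.toNat).map (fun j => (arr.countP (fun e => pvW clave_idx rango offset e == j) : Int)))
      = (List.range rango.toNat).map (fun j => if j < m + 1
          then (pvCum clave_idx rango offset arr (j + 1) : Int)
          else (arr.countP (fun e => pvW clave_idx rango offset e == j) : Int)) := by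
    intro m
    induction m with
    | zero =>
      intro _
      simp only [List.range_zero, List.map_nil, List.foldl_nil]
      apply List.map_congr_left
      intro j _
      by_cases h : j < 1
      · have : j = 0 := by omega
        subst this
        simp [pvCum, List.range_one]
      · simp [h]
    | succ m ihm =>
      intro hm
      rw [List.range_succ, List.map_append, List.foldl_append, ihm (by omega)]
      simp only [List.map_cons, List.map_nil, List.foldl_cons, List.foldl_nil]
      have hb1 : -rango ≤ (1 + (m : Int)) := by omega
      have hb2 : (1 + (m : Int)) < rango := by omega
      have hw : pvWIdx rango (1 + (m : Int)) = m + 1 := by unfold pvWIdx; split <;> omega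
      have hm1 : (1 + (m : Int)) - 1 = ((m : Nat) : Int) := by ring
      rw [step_read _ _ _ _ hb1 hb2, hm1, step_read _ _ _ _ (by omega) (by omega),
        step_write _ _ _ _ hb1 hb2, hw]
      have hwm : pvWIdx rango ((m : Nat) : Int) = m := by unfold pvWIdx; split <;> omega
      rw [hwm]
      apply List.map_congr_left
      intro j _
      by_cases h : j = m + 1
      · subst h
        simp only [if_pos (by omega : m + 1 < m + 1 + 1),
          if_neg (by omega : ¬ m + 1 < m + 1), if_pos (by omega : m < m + 1)]
        have : pvCum clave_idx rango offset arr (m + 1 + 1)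
            = pvCum clave_idx rango offset arr (m + 1)
              + arr.countP (fun e => pvW clave_idx rango offset e == m + 1) := by
          simp only [pvCum, List.range_succ, List.map_append, List.sum_append,
            List.map_cons, List.map_nil, List.sum_cons, List.sum_nil]
          omega
        rw [this]; push_cast; ring
      · by_cases h2 : j < m + 1 <;> simp [h, h2] <;> omega
  have hfin : PySem.List.pyRange 1 rango 1
      = (List.range (rango - 1).toNat).map (fun k : Nat => 1 + (k : Int)) :=
    PySem.List.pyRange_one 1 rango
  rw [hfin, key (rango - 1).toNat (by omega)]
  apply List.map_congr_left
  intro j hj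
  simp only [List.mem_range] at hj
  rw [if_pos (by omega)]

-- ===== A, pass 3: reverse placement =====
-- count of a bucket within the still-unprocessed suffix of length s
def pvSC (clave_idx rango offset : Int) (arr : List (List Int)) (s j : Nat) : Nat :=
  (arr.drop (arr.length - s)).countP (fun e => pvW clave_idx rango offset e == j)
-- the state of bucket j's slice of `resultado` after s placement steps
def pvSeg (clave_idx rango offset : Int) (arr : List (List Int)) (s j : Nat) : List (List Int) :=
  List.replicate (arr.countP (fun e => pvW clave_idx rango offset e == j) - pvSC clave_idx rango offset arr s j) []
    ++ (arr.drop (arr.length - s)).filter (fun e => pvW clave_idx rango offset e == j)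


-- pvCum unfolds one step
theorem pvCum_succ (clave_idx rango offset : Int) (arr : List (List Int)) (j : Nat) :
    pvCum clave_idx rango offset arr (j + 1)
      = pvCum clave_idx rango offset arr j + arr.countP (fun e => pvW clave_idx rango offset e == j) := by
  simp [pvCum, List.range_succ]

-- a suffix count never exceeds the total count
theorem pvSC_le (clave_idx rango offset : Int) (arr : List (List Int)) (s j : Nat) :
    pvSC clave_idx rango offset arr s j ≤ arr.countP (fun e => pvW clave_idx rango offset e == j) := by
  unfold pvSC
  conv_rhs => rw [← List.take_append_drop (arr.length - s) arr]
  rw [List.countP_append]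
  omega

-- each segment of `resultado` keeps the length of its bucket
theorem seg_length (clave_idx rango offset : Int) (arr : List (List Int)) (s j : Nat) :
    (pvSeg clave_idx rango offset arr s j).length
      = arr.countP (fun e => pvW clave_idx rango offset e == j) := by
  have h := pvSC_le clave_idx rango offset arr s j
  simp only [pvSeg, List.length_append, List.length_replicate, ← List.countP_eq_length_filter]
  unfold pvSC at *
  omega

-- writing one cell of a flattened list of lists
theorem set_flatten {α : Type} : ∀ (ls : List (List α)) (j k : Nat) (hj : j < ls.length),
    k < (ls[j]'hj).length → ∀ (v : α),
    ls.flatten.set (((ls.take j).map List.length).sum + k) v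
      = (ls.set j ((ls[j]'hj).set k v)).flatten := by
  intro ls
  induction ls with
  | nil => intro j k hj; exact absurd hj (by simp)
  | cons a ls ih =>
    intro j k hj hk v
    cases j with
    | zero =>
      simp only [List.getElem_cons_zero] at hk ⊢
      simp only [List.flatten_cons, List.take_zero, List.map_nil, List.sum_nil, Nat.zero_add,
        List.set_cons_zero]
      rw [List.set_append, if_pos (by omega)]
    | succ j =>
      simp only [List.getElem_cons_succ] at hk ⊢
      have hj' : j < ls.length := by simp at hj; omega
      simp only [List.flatten_cons, List.take_succ_cons, List.map_cons, List.sum_cons,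
        List.set_cons_succ]
      rw [List.set_append, if_neg (by omega)]
      have harith : a.length + ((ls.take j).map List.length).sum + k - a.length
          = ((ls.take j).map List.length).sum + k := by omega
      rw [harith, ih j k hj' hk v]

-- sum of pointwise sums
theorem sum_map_addN {α : Type} (l : List α) (f g : α → Nat) :
    (l.map (fun x => f x + g x)).sum = (l.map f).sum + (l.map g).sum := by
  induction l with
  | nil => simp
  | cons a l ih => simp [ih]; omega

-- indicator sum over a range
theorem sum_indicator (t R : Nat) :
    ((List.range R).map (fun j => if (t == j) = true then 1 else 0)).sum = if t < R then 1 else 0 := by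
  induction R with
  | zero => simp
  | succ R ih =>
    rw [List.range_succ, List.map_append, List.sum_append, ih]
    simp only [List.map_cons, List.map_nil, List.sum_cons, List.sum_nil, Nat.add_zero]
    by_cases h : t = R
    · subst h; simp
    · have h2 : (t == R) = false := by simp [h]
      rw [h2]
      simp only [Bool.false_eq_true, if_false]
      by_cases h3 : t < R
      · rw [if_pos h3, if_pos (by omega)]
      · rw [if_neg h3, if_neg (by omega)]

-- the buckets partition the whole list
theorem sum_count (clave_idx rango offset : Int) (arr : List (List Int))
    (hok : ∀ e ∈ arr, pvOk clave_idx rango offset e) :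
    ((List.range rango.toNat).map
      (fun j => arr.countP (fun e => pvW clave_idx rango offset e == j))).sum = arr.length := by
  induction arr with
  | nil => simp
  | cons e l ih =>
    have hlt := (pvW_lt clave_idx rango offset e (hok e (by simp))).2
    have hsplit : ((List.range rango.toNat).map
        (fun j => (e :: l).countP (fun x => pvW clave_idx rango offset x == j))).sum
      = ((List.range rango.toNat).map
          (fun j => l.countP (fun x => pvW clave_idx rango offset x == j))).sum
        + ((List.range rango.toNat).map
          (fun j => if (pvW clave_idx rango offset e == j) = true then 1 else 0)).sum := by
      rw [← sum_map_addN]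
      apply congrArg
      apply List.map_congr_left
      intro j _
      simp [List.countP_cons]
    rw [hsplit, ih (fun x hx => hok x (by simp [hx])), sum_indicator, if_pos hlt]
    simp

-- flattening constant-[] segments
theorem flatten_replicate (g : Nat → Nat) (R : Nat) :
    (((List.range R).map (fun j => List.replicate (g j) ([] : List Int))).flatten)
      = List.replicate (((List.range R).map g).sum) [] := by
  induction R with
  | zero => simp
  | succ R ih =>
    rw [List.range_succ, List.map_append, List.flatten_append, ih,
      List.map_append, List.sum_append]
    simp only [List.map_cons, List.map_nil, List.flatten_cons, List.flatten_nil,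
      List.append_nil, List.sum_cons, List.sum_nil, Nat.add_zero]
    rw [← List.replicate_add]

-- range(a, b-1, -1) = range(a, b, -1) + [b]
theorem pyRange_neg_one_snoc (a b : Int) (h : b ≤ a) :
    PySem.List.pyRange a (b - 1) (-1) = PySem.List.pyRange a b (-1) ++ [b] := by
  rw [PySem.List.pyRange_neg_one_eq_reverse a (b - 1), PySem.List.pyRange_neg_one_eq_reverse a b,
    show b - 1 + 1 = b by ring, PySem.List.pyRange_one_cons (by omega : b < a + 1),
    List.reverse_cons]

theorem place_pass (clave_idx rango offset : Int) (arr : List (List Int))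
    (hok : ∀ e ∈ arr, pvOk clave_idx rango offset e) :
    ∀ (s : Nat), s ≤ arr.length →
    (PySem.List.pyRange ((arr.length : Int) - 1) ((arr.length : Int) - 1 - s) (-1)).foldl
      (fun (st : List Int × List (List Int)) i =>
        let c := PySem.List.pyGetD (PySem.List.pyGetD arr i []) clave_idx 0 - offset
        let conteo' := PySem.List.pySetD st.1 c (PySem.List.pyGetD st.1 c 0 - 1)
        (conteo', PySem.List.pySetD st.2 (PySem.List.pyGetD conteo' c 0) (PySem.List.pyGetD arr i [])))
      ((List.range rango.toNat).map (fun j => (pvCum clave_idx rango offset arr (j + 1) : Int)),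
       List.replicate arr.length [])
    = ((List.range rango.toNat).map
         (fun j => (pvCum clave_idx rango offset arr (j + 1) : Int) - pvSC clave_idx rango offset arr s j),
       ((List.range rango.toNat).map (pvSeg clave_idx rango offset arr s)).flatten) := by
  intro s
  induction s with
  | zero =>
    intro _
    have h0 : ((arr.length : Int) - 1 - ((0 : Nat) : Int)) = (arr.length : Int) - 1 := by
      push_cast; ring
    rw [h0, PySem.List.pyRange_neg_one_eq_nil (le_refl _), List.foldl_nil]
    have hsc0 : ∀ j, pvSC clave_idx rango offset arr 0 j = 0 := by
      intro j; simp [pvSC]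
    simp only [Prod.mk.injEq]
    constructor
    · apply List.map_congr_left; intro j _; rw [hsc0 j]; simp
    · have hseg0 : ∀ j ∈ List.range rango.toNat, pvSeg clave_idx rango offset arr 0 j
          = List.replicate (arr.countP (fun e => pvW clave_idx rango offset e == j)) [] := by
        intro j _; simp [pvSeg, pvSC]
      rw [List.map_congr_left hseg0,
        flatten_replicate (fun j => arr.countP (fun e => pvW clave_idx rango offset e == j)),
        sum_count clave_idx rango offset arr hok]
  | succ s ihs =>
    intro hs1
    have hs : s ≤ arr.length := by omega
    have hpeel : ((arr.length : Int) - 1 - ((s + 1 : Nat) : Int))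
        = ((arr.length : Int) - 1 - ((s : Nat) : Int)) - 1 := by push_cast; ring
    rw [hpeel, pyRange_neg_one_snoc _ _ (by omega), List.foldl_append, ihs hs,
      List.foldl_cons, List.foldl_nil]
    have hidxlt : arr.length - 1 - s < arr.length := by omega
    have hgetarr : PySem.List.pyGetD arr ((arr.length : Int) - 1 - ((s : Nat) : Int)) []
        = arr[arr.length - 1 - s]'hidxlt := by
      rw [PySem.List.pyGetD_eq_getElem _ _ (by omega) (by omega)]
      simp only [show (((arr.length : Int) - 1 - ((s : Nat) : Int))).toNat = arr.length - 1 - s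
        from by omega]
    obtain ⟨⟨hi1, hi2⟩, hk1, hk2⟩ := hok _ (List.getElem_mem hidxlt)
    unfold pvKey at hk1 hk2
    simp only [hgetarr]
    rw [step_read _ _ _ _ hk1 hk2, step_write _ _ _ _ hk1 hk2, step_read _ _ _ _ hk1 hk2]
    simp only [if_pos rfl]
    have htlt : pvWIdx rango (PySem.List.pyGetD (arr[arr.length - 1 - s]'hidxlt) clave_idx 0 - offset)
        < rango.toNat := by unfold pvWIdx; split <;> omega
    have hweq : pvW clave_idx rango offset (arr[arr.length - 1 - s]'hidxlt)
        = pvWIdx rango (PySem.List.pyGetD (arr[arr.length - 1 - s]'hidxlt) clave_idx 0 - offset) := rfl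
    have hdrop : arr.drop (arr.length - (s + 1))
        = (arr[arr.length - 1 - s]'hidxlt) :: arr.drop (arr.length - s) := by
      rw [show arr.length - (s + 1) = arr.length - 1 - s from by omega,
        List.drop_eq_getElem_cons hidxlt,
        show arr.length - 1 - s + 1 = arr.length - s from by omega]
    have hsc : ∀ j, pvSC clave_idx rango offset arr (s + 1) j
        = (if (pvW clave_idx rango offset (arr[arr.length - 1 - s]'hidxlt) == j) = true then 1 else 0)
          + pvSC clave_idx rango offset arr s j := by
      intro j; unfold pvSC; rw [hdrop, List.countP_cons]; omega
    have hsct : pvSC clave_idx rango offset arr (s + 1)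
          (pvWIdx rango (PySem.List.pyGetD (arr[arr.length - 1 - s]'hidxlt) clave_idx 0 - offset))
        = pvSC clave_idx rango offset arr s
          (pvWIdx rango (PySem.List.pyGetD (arr[arr.length - 1 - s]'hidxlt) clave_idx 0 - offset)) + 1 := by
      rw [hsc _, hweq, if_pos (by simp)]; omega
    have hscle := pvSC_le clave_idx rango offset arr (s + 1)
      (pvWIdx rango (PySem.List.pyGetD (arr[arr.length - 1 - s]'hidxlt) clave_idx 0 - offset))
    simp only [Prod.mk.injEq]
    constructor
    · apply List.map_congr_left
      intro j hj
      by_cases hjt : j = pvWIdx rango (PySem.List.pyGetD (arr[arr.length - 1 - s]'hidxlt) clave_idx 0 - offset)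
      · subst hjt
        rw [if_pos rfl, hsct]
        push_cast
        ring
      · rw [if_neg hjt, hsc j, hweq]
        have hne : pvWIdx rango (PySem.List.pyGetD (arr[arr.length - 1 - s]'hidxlt) clave_idx 0 - offset) ≠ j :=
          fun hh => hjt hh.symm
        have hb : (pvWIdx rango (PySem.List.pyGetD (arr[arr.length - 1 - s]'hidxlt) clave_idx 0 - offset) == j) = false := by
          simp [hne]
        rw [hb]
        simp
    · have hv : (pvCum clave_idx rango offset arr
            (pvWIdx rango (PySem.List.pyGetD (arr[arr.length - 1 - s]'hidxlt) clave_idx 0 - offset) + 1) : Int)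
          - pvSC clave_idx rango offset arr s
            (pvWIdx rango (PySem.List.pyGetD (arr[arr.length - 1 - s]'hidxlt) clave_idx 0 - offset)) - 1
        = (((pvCum clave_idx rango offset arr
            (pvWIdx rango (PySem.List.pyGetD (arr[arr.length - 1 - s]'hidxlt) clave_idx 0 - offset))
          + (arr.countP (fun e => pvW clave_idx rango offset e
              == pvWIdx rango (PySem.List.pyGetD (arr[arr.length - 1 - s]'hidxlt) clave_idx 0 - offset))
            - pvSC clave_idx rango offset arr (s + 1)
              (pvWIdx rango (PySem.List.pyGetD (arr[arr.length - 1 - s]'hidxlt) clave_idx 0 - offset)))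
            : Nat)) : Int) := by
        have h1 := pvCum_succ clave_idx rango offset arr
          (pvWIdx rango (PySem.List.pyGetD (arr[arr.length - 1 - s]'hidxlt) clave_idx 0 - offset))
        omega
      simp only [if_true]
      rw [hv, PySem.List.pySetD_of_nonneg _ _ (Int.natCast_nonneg _)]
      simp only [Int.toNat_natCast]
      have htake : ((((List.range rango.toNat).map (pvSeg clave_idx rango offset arr s)).take
            (pvWIdx rango (PySem.List.pyGetD (arr[arr.length - 1 - s]'hidxlt) clave_idx 0 - offset))).map
            List.length).sum
          = pvCum clave_idx rango offset arr
            (pvWIdx rango (PySem.List.pyGetD (arr[arr.length - 1 - s]'hidxlt) clave_idx 0 - offset)) := by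
        rw [← List.map_take, List.take_range, show
          min (pvWIdx rango (PySem.List.pyGetD (arr[arr.length - 1 - s]'hidxlt) clave_idx 0 - offset))
            rango.toNat
          = pvWIdx rango (PySem.List.pyGetD (arr[arr.length - 1 - s]'hidxlt) clave_idx 0 - offset)
          from by omega, List.map_map]
        unfold pvCum
        apply congrArg
        apply List.map_congr_left
        intro j _
        simp [seg_length]
      have hjR : pvWIdx rango (PySem.List.pyGetD (arr[arr.length - 1 - s]'hidxlt) clave_idx 0 - offset)
          < ((List.range rango.toNat).map (pvSeg clave_idx rango offset arr s)).length := by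
        simpa using htlt
      rw [show pvCum clave_idx rango offset arr
            (pvWIdx rango (PySem.List.pyGetD (arr[arr.length - 1 - s]'hidxlt) clave_idx 0 - offset))
          + (arr.countP (fun e => pvW clave_idx rango offset e
              == pvWIdx rango (PySem.List.pyGetD (arr[arr.length - 1 - s]'hidxlt) clave_idx 0 - offset))
            - pvSC clave_idx rango offset arr (s + 1)
              (pvWIdx rango (PySem.List.pyGetD (arr[arr.length - 1 - s]'hidxlt) clave_idx 0 - offset)))
        = ((((List.range rango.toNat).map (pvSeg clave_idx rango offset arr s)).take
            (pvWIdx rango (PySem.List.pyGetD (arr[arr.length - 1 - s]'hidxlt) clave_idx 0 - offset))).map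
            List.length).sum
          + (arr.countP (fun e => pvW clave_idx rango offset e
              == pvWIdx rango (PySem.List.pyGetD (arr[arr.length - 1 - s]'hidxlt) clave_idx 0 - offset))
            - pvSC clave_idx rango offset arr (s + 1)
              (pvWIdx rango (PySem.List.pyGetD (arr[arr.length - 1 - s]'hidxlt) clave_idx 0 - offset)))
        from by rw [htake]]
      rw [set_flatten _ _ _ hjR (by
        simp only [List.getElem_map, List.getElem_range]
        rw [seg_length]
        omega) _]
      simp only [List.getElem_map, List.getElem_range]
      have hsegset : (pvSeg clave_idx rango offset arr s
            (pvWIdx rango (PySem.List.pyGetD (arr[arr.length - 1 - s]'hidxlt) clave_idx 0 - offset))).set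
          (arr.countP (fun e => pvW clave_idx rango offset e
              == pvWIdx rango (PySem.List.pyGetD (arr[arr.length - 1 - s]'hidxlt) clave_idx 0 - offset))
            - pvSC clave_idx rango offset arr (s + 1)
              (pvWIdx rango (PySem.List.pyGetD (arr[arr.length - 1 - s]'hidxlt) clave_idx 0 - offset)))
          (arr[arr.length - 1 - s]'hidxlt)
        = pvSeg clave_idx rango offset arr (s + 1)
            (pvWIdx rango (PySem.List.pyGetD (arr[arr.length - 1 - s]'hidxlt) clave_idx 0 - offset)) := by
        unfold pvSeg
        rw [hdrop, List.filter_cons, show (arr.countP (fun e => pvW clave_idx rango offset e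
              == pvWIdx rango (PySem.List.pyGetD (arr[arr.length - 1 - s]'hidxlt) clave_idx 0 - offset))
            - pvSC clave_idx rango offset arr s
              (pvWIdx rango (PySem.List.pyGetD (arr[arr.length - 1 - s]'hidxlt) clave_idx 0 - offset)))
          = (arr.countP (fun e => pvW clave_idx rango offset e
              == pvWIdx rango (PySem.List.pyGetD (arr[arr.length - 1 - s]'hidxlt) clave_idx 0 - offset))
            - pvSC clave_idx rango offset arr (s + 1)
              (pvWIdx rango (PySem.List.pyGetD (arr[arr.length - 1 - s]'hidxlt) clave_idx 0 - offset))) + 1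
          from by omega, List.replicate_succ']
        rw [List.set_append, if_pos (by simp), List.set_append, if_neg (by simp)]
        simp [hweq]
      rw [hsegset, map_range_set _ _ _ htlt]
      apply congrArg
      apply List.map_congr_left
      intro j hj
      by_cases hjt : j = pvWIdx rango (PySem.List.pyGetD (arr[arr.length - 1 - s]'hidxlt) clave_idx 0 - offset)
      · rw [if_pos hjt, hjt]
      · rw [if_neg hjt]
        unfold pvSeg
        rw [hdrop, List.filter_cons]
        have hne : pvWIdx rango (PySem.List.pyGetD (arr[arr.length - 1 - s]'hidxlt) clave_idx 0 - offset) ≠ j :=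
          fun hh => hjt hh.symm
        have hb : (pvW clave_idx rango offset (arr[arr.length - 1 - s]'hidxlt) == j) = false := by
          rw [hweq]; simp [hne]
        rw [hb, hsc j, hb]
        simp

-- ===== B: buckets =====
theorem bucket_pass (clave_idx rango offset : Int) :
    ∀ (l p : List (List Int)), (∀ e ∈ l, pvOk clave_idx rango offset e) →
    l.foldl (fun buckets elem =>
        let c := PySem.List.pyGetD elem clave_idx 0 - offset
        PySem.List.pySetD buckets c (PySem.List.pyGetD buckets c [] ++ [elem]))
      ((List.range rango.toNat).map (fun j => p.filter (fun e => pvW clave_idx rango offset e == j)))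
    = (List.range rango.toNat).map (fun j => (p ++ l).filter (fun e => pvW clave_idx rango offset e == j)) := by
  intro l
  induction l with
  | nil => intro p _; simp
  | cons e l ih =>
    intro p hl
    obtain ⟨⟨hi1, hi2⟩, hk1, hk2⟩ := hl e (by simp)
    unfold pvKey at hk1 hk2
    rw [List.foldl_cons]
    simp only []
    rw [step_read _ _ _ _ hk1 hk2, step_write _ _ _ _ hk1 hk2]
    have hmap : (List.range rango.toNat).map
        (fun j => if j = pvWIdx rango (PySem.List.pyGetD e clave_idx 0 - offset)
          then (p.filter (fun e' => pvW clave_idx rango offset e' == pvWIdx rango (PySem.List.pyGetD e clave_idx 0 - offset)) ++ [e])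
          else p.filter (fun e' => pvW clave_idx rango offset e' == j))
        = (List.range rango.toNat).map
          (fun j => (p ++ [e]).filter (fun e' => pvW clave_idx rango offset e' == j)) := by
      apply List.map_congr_left
      intro j _
      have hpw : pvW clave_idx rango offset e = pvWIdx rango (PySem.List.pyGetD e clave_idx 0 - offset) := rfl
      by_cases h : j = pvWIdx rango (PySem.List.pyGetD e clave_idx 0 - offset) <;>
        simp [h, List.filter_append, hpw] <;> omega
    rw [hmap, ih (p ++ [e]) (fun x hx => hl x (by simp [hx]))]
    simp

-- ===== VERDICT (by name: the statement is the Claim_ definition above) =====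
-- the final shape shared by both ports
theorem a_eq_flatten (arreglo : List (List Int)) (clave_idx rango offset : Int)
    (hok : ∀ e ∈ arreglo, pvOk clave_idx rango offset e) (hne : arreglo ≠ []) :
    counting_sort_estable arreglo clave_idx rango offset
      = ((List.range rango.toNat).map
          (fun j => arreglo.filter (fun e => pvW clave_idx rango offset e == j))).flatten := by
  obtain ⟨e0, he0⟩ := List.exists_mem_of_ne_nil arreglo hne
  have hr : 0 < rango := by
    have := hok e0 he0; unfold pvOk at this; omega
  have e1 : counting_sort_estable arreglo clave_idx rango offset
      = (List.foldl (fun (st : List Int × List (List Int)) i =>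
          let c := PySem.List.pyGetD (PySem.List.pyGetD arreglo i []) clave_idx 0 - offset
          let conteo' := PySem.List.pySetD st.1 c (PySem.List.pyGetD st.1 c 0 - 1)
          (conteo', PySem.List.pySetD st.2 (PySem.List.pyGetD conteo' c 0) (PySem.List.pyGetD arreglo i [])))
          ((PySem.List.pyRange 1 rango 1).foldl (fun conteo i =>
              PySem.List.pySetD conteo i (PySem.List.pyGetD conteo i 0 + PySem.List.pyGetD conteo (i - 1) 0))
            (arreglo.foldl (fun conteo elem =>
              PySem.List.pySetD conteo (PySem.List.pyGetD elem clave_idx 0 - offset)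
                (PySem.List.pyGetD conteo (PySem.List.pyGetD elem clave_idx 0 - offset) 0 + 1))
              (List.replicate rango.toNat 0)),
           List.replicate ((arreglo.length : Int)).toNat [])
          (PySem.List.pyRange ((arreglo.length : Int) - 1) (-1) (-1))).2 := by
    rfl
  have h0 : List.replicate rango.toNat (0 : Int)
      = (List.range rango.toNat).map
          (fun j => ((([] : List (List Int)).countP (fun e => pvW clave_idx rango offset e == j) : Nat) : Int)) := by
    simp
  have hrep : ((arreglo.length : Int)).toNat = arreglo.length := by omega
  have hpp := place_pass clave_idx rango offset arreglo hok arreglo.length (le_refl _)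
  rw [show (arreglo.length : Int) - 1 - ((arreglo.length : Nat) : Int) = (-1 : Int)
    from by omega] at hpp
  rw [e1, h0, count_pass clave_idx rango offset arreglo [] hok, List.nil_append,
    prefix_pass clave_idx rango offset arreglo hr, hrep, hpp]
  dsimp only
  apply congrArg
  apply List.map_congr_left
  intro j _
  simp [pvSeg, pvSC]

theorem b_eq_flatten (arreglo : List (List Int)) (clave_idx rango offset : Int)
    (hok : ∀ e ∈ arreglo, pvOk clave_idx rango offset e) :
    counting_sort_estable_alt arreglo clave_idx rango offset
      = ((List.range rango.toNat).map
          (fun j => arreglo.filter (fun e => pvW clave_idx rango offset e == j))).flatten := by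
  have e1 : counting_sort_estable_alt arreglo clave_idx rango offset
      = (arreglo.foldl (fun buckets elem =>
          let c := PySem.List.pyGetD elem clave_idx 0 - offset
          PySem.List.pySetD buckets c (PySem.List.pyGetD buckets c [] ++ [elem]))
          ((PySem.List.pyRange 0 rango 1).map (fun _ => []))).foldl
          (fun resultado b => resultado ++ b) [] := by
    rfl
  have hb0 : (PySem.List.pyRange 0 rango 1).map (fun _ => ([] : List (List Int)))
      = (List.range rango.toNat).map
          (fun j => (([] : List (List Int)).filter (fun e => pvW clave_idx rango offset e == j))) := by
    rw [PySem.List.pyRange_one 0 rango]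
    simp [Function.comp_def]
  rw [e1, hb0, bucket_pass clave_idx rango offset arreglo [] hok, List.nil_append,
    PySem.List.foldl_append_eq_flatMap (fun b => b)]
  simp [List.flatMap_def, Function.comp_def]

theorem counting_sort_estable_spec : Claim_equal_counting_sort_estable := by
  unfold Claim_equal_counting_sort_estable
  intro arreglo clave_idx rango offset _ hpre
  unfold Spec_counting_sort_estable
  have hok : ∀ e ∈ arreglo, pvOk clave_idx rango offset e := by
    intro e he
    unfold pvOk pvKey
    exact hpre e he
  by_cases hne : arreglo = []
  · subst hne
    have hA : counting_sort_estable [] clave_idx rango offset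
        = (List.foldl (fun (st : List Int × List (List Int)) i =>
            let c := PySem.List.pyGetD (PySem.List.pyGetD ([] : List (List Int)) i []) clave_idx 0 - offset
            let conteo' := PySem.List.pySetD st.1 c (PySem.List.pyGetD st.1 c 0 - 1)
            (conteo', PySem.List.pySetD st.2 (PySem.List.pyGetD conteo' c 0)
              (PySem.List.pyGetD ([] : List (List Int)) i [])))
            ((PySem.List.pyRange 1 rango 1).foldl (fun conteo i =>
                PySem.List.pySetD conteo i (PySem.List.pyGetD conteo i 0 + PySem.List.pyGetD conteo (i - 1) 0))
              (List.replicate rango.toNat 0),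
             ([] : List (List Int)))
            (PySem.List.pyRange ((0 : Int) - 1) (-1) (-1))).2 := by
      rfl
    have hB : counting_sort_estable_alt [] clave_idx rango offset
        = ((PySem.List.pyRange 0 rango 1).map (fun _ => ([] : List (List Int)))).foldl
            (fun resultado b => resultado ++ b) [] := by
      rfl
    rw [hA, hB, show PySem.List.pyRange ((0 : Int) - 1) (-1) (-1) = []
        from PySem.List.pyRange_neg_one_eq_nil (by norm_num), List.foldl_nil,
      PySem.List.foldl_append_eq_flatMap (fun b => b)]
    simp [List.flatMap_def]
  · rw [a_eq_flatten arreglo clave_idx rango offset hok hne,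
      b_eq_flatten arreglo clave_idx rango offset hok]
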